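-- pv_equiv track=rewrite | github.com/Nanaacaw/vision-extract | ocr_engine/ocr.py | _merge_structured_data
-- ===== SOURCE A (Python) =====
-- from typing import Optional, List, Dict, Tuple
--
-- def _merge_structured_data(pages_data: List[dict]) -> dict:
--     """Merge structured data from multiple pages."""
--     merged = {
--         'emails': [],
--         'phones': [],
--         'urls': [],
--         'dates': [],
--         'prices': [],
--         'names': [],
--         'addresses': [],
--         'key_phrases': [],
--         'logos_text': []
--     }
--
--     for page in pages_data:
--         if 'structured_data' in page and page['structured_data']:
--             for key in merged:
--                 if key in page['structured_data']:
--                     merged[key].extend(page['structured_data'][key])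
--
--     # Deduplicate
--     for key in merged:
--         merged[key] = list(dict.fromkeys(merged[key]))
--
--     return merged
-- ===== SOURCE B (Python) =====
-- _KEYS = ('emails', 'phones', 'urls', 'dates', 'prices', 'names',
--          'addresses', 'key_phrases', 'logos_text')
--
--
-- def _collect_key(pages_data, key):
--     """Scan all pages for one key, deduplicating on the fly."""
--     seen = set()
--     out = []
--     for page in pages_data:
--         sd = page.get('structured_data')
--         if sd:
--             for value in sd.get(key, ()):
--                 if value not in seen:
--                     seen.add(value)
--                     out.append(value)
--     return out
--
--
-- def _merge_structured_data(pages_data):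
--     """Merge structured data from multiple pages."""
--     # Key-major: one independent streaming scan over the pages per key,
--     # instead of a page-major merge followed by a dedup stage.
--     return {key: _collect_key(pages_data, key) for key in _KEYS}
-- ===== Notes on version B (the rewrite author's own statement) =====
-- stated objective: alternative
-- what changed: B transposes the loop nest: instead of A's page-major merge (extend per page) followed by a separate dict.fromkeys dedup stage, B is key-major - for each of the nine keys it runs its own streaming scan over the pages with a seen-set, appending each value on first occurrence, so there is no merged intermediate list and no dedup pass.
import Mathlib
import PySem

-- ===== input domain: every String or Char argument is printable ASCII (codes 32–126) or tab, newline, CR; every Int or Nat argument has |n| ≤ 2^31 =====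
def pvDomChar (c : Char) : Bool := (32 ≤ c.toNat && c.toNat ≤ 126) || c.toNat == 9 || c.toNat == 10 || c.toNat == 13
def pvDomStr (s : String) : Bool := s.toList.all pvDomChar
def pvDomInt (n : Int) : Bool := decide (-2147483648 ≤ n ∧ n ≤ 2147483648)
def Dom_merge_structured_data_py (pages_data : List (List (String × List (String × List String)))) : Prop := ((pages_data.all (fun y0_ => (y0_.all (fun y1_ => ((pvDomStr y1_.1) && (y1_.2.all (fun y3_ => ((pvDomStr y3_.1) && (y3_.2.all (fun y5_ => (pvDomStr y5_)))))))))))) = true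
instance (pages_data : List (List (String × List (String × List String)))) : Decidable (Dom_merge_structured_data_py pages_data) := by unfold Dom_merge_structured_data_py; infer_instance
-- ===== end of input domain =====

-- ===== PORT A =====
-- B is key-major with a streaming seen-set dedup per key; A is page-major merge then a separate dedup stage.
def pvKeys : List String :=
  ["emails", "phones", "urls", "dates", "prices", "names", "addresses", "key_phrases", "logos_text"]

def pvMerged0 : PySem.Dict String (List String) :=
  PySem.Dict.ofList (pvKeys.map (fun k => (k, ([] : List String))))

-- inner 'for key in merged' loop of A (keys is the snapshot of merged's keys, which never change)
def pvAInner (sd : List (String × List String)) (keys : List String)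
    (m : PySem.Dict String (List String)) : PySem.Dict String (List String) :=
  keys.foldl (fun m key =>
    if (PySem.Dict.mk sd).contains key then
      m.modify key [] (fun old => old ++ (PySem.Dict.mk sd).getD key [])
    else m) m

def pvAPage (m : PySem.Dict String (List String))
    (page : List (String × List (String × List String))) : PySem.Dict String (List String) :=
  match (PySem.Dict.mk page).get? "structured_data" with
  | some sd => if sd.isEmpty then m else pvAInner sd m.keys m
  | none => m

def pvADedup (m : PySem.Dict String (List String)) : PySem.Dict String (List String) :=
  m.keys.foldl (fun m key => m.insert key (PySem.List.dedup (m.getD key []))) m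

def merge_structured_data_py (pages_data : List (List (String × List (String × List String)))) : List (String × List String) :=
  (pvADedup (pages_data.foldl pvAPage pvMerged0)).items

-- ===== PORT B =====
-- 'if value not in seen: seen.add(value); out.append(value)'
def pvBStep (acc : PySem.Set String × List String) (v : String) : PySem.Set String × List String :=
  if PySem.Set.contains acc.1 v then acc else (PySem.Set.add acc.1 v, acc.2 ++ [v])

-- one page of _collect_key's scan for a fixed key
def pvBPage (key : String) (acc : PySem.Set String × List String)
    (page : List (String × List (String × List String))) : PySem.Set String × List String :=
  match (PySem.Dict.mk page).get? "structured_data" with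
  | some sd => if sd.isEmpty then acc else ((PySem.Dict.mk sd).getD key []).foldl pvBStep acc
  | none => acc

def pvCollectKey (pages_data : List (List (String × List (String × List String)))) (key : String) : List String :=
  (pages_data.foldl (pvBPage key) (PySem.Set.empty, [])).2

def merge_structured_data_py_alt (pages_data : List (List (String × List (String × List String)))) : List (String × List String) :=
  pvKeys.map (fun key => (key, pvCollectKey pages_data key))

-- ===== PRECONDITION & SPEC =====
def Spec_merge_structured_data_py (pages_data : List (List (String × List (String × List String)))) (out : List (String × List String)) : Prop := out = merge_structured_data_py_alt pages_data
instance (pages_data : List (List (String × List (String × List String)))) (out : List (String × List String)) : Decidable (Spec_merge_structured_data_py pages_data out) := by unfold Spec_merge_structured_data_py; infer_instance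

-- ===== CLAIM (what is proved, stated in full; the proofs are below) =====
def Claim_equal_merge_structured_data_py : Prop := ∀ (pages_data : List (List (String × List (String × List String)))), Dom_merge_structured_data_py pages_data → Spec_merge_structured_data_py pages_data (merge_structured_data_py pages_data)

-- ===== LEMMAS AND PROOFS =====

-- B's (seen, out) pair stays diagonal: folding pvBStep from (s, s) is Set.update on both components.
lemma pvBStep_diag : ∀ (vs : List String) (s : PySem.Set String),
    vs.foldl pvBStep (s, s) = (PySem.Set.update s vs, PySem.Set.update s vs) := by
  intro vs
  induction vs with
  | nil => intro s; simp [PySem.Set.update]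
  | cons v rest ih =>
    intro s
    have hstep : pvBStep (s, s) v = (PySem.Set.add s v, PySem.Set.add s v) := by
      unfold pvBStep PySem.Set.add
      by_cases h : v ∈ s <;> simp [h]
    rw [List.foldl_cons, hstep, ih, PySem.Set.update_cons]

-- A's inner loop appends each key's page contribution to that key's list.
lemma pvAInner_getD (sd : List (String × List String)) :
    ∀ (keys : List String) (m : PySem.Dict String (List String)), keys.Nodup →
    ∀ k, (pvAInner sd keys m).getD k []
        = if k ∈ keys then m.getD k [] ++ (PySem.Dict.mk sd).getD k [] else m.getD k [] := by
  intro keys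
  induction keys with
  | nil => intro m _ k; simp [pvAInner]
  | cons key rest ih =>
    intro m hnd k
    rw [List.nodup_cons] at hnd
    obtain ⟨hnotmem, hndr⟩ := hnd
    simp only [pvAInner, List.foldl_cons]
    have hm' : ∀ k', (if (PySem.Dict.mk sd).contains key then
          m.modify key [] (fun old => old ++ (PySem.Dict.mk sd).getD key [])
        else m).getD k' []
        = if k' = key then m.getD k' [] ++ (PySem.Dict.mk sd).getD k' [] else m.getD k' [] := by
      intro k'
      by_cases hc : (PySem.Dict.mk sd).contains key
      · rw [if_pos hc]
        by_cases hk : k' = key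
        · subst hk; rw [if_pos rfl, PySem.Dict.getD_modify_self]
        · rw [if_neg hk, PySem.Dict.getD_modify_of_ne _ _ _ hk]
      · have hv : (PySem.Dict.mk sd).getD key [] = [] :=
          PySem.Dict.getD_of_not_contains _ _ (Bool.eq_false_iff.mpr hc)
        rw [if_neg hc]
        by_cases hk : k' = key
        · subst hk; rw [if_pos rfl, hv, List.append_nil]
        · rw [if_neg hk]
    have := ih (if (PySem.Dict.mk sd).contains key then
        m.modify key [] (fun old => old ++ (PySem.Dict.mk sd).getD key []) else m) hndr k
    rw [pvAInner] at this
    rw [this]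
    by_cases hr : k ∈ rest
    · have hk : ¬ k = key := fun h => hnotmem (h ▸ hr)
      rw [if_pos hr, hm' k, if_neg hk, if_pos (by simp [hr])]
    · rw [if_neg hr, hm' k]
      by_cases hk : k = key
      · rw [if_pos hk, if_pos (by simp [hk])]
      · rw [if_neg hk, if_neg (by simp [hk, hr])]

lemma pvAInner_keys (sd : List (String × List String)) :
    ∀ (keys : List String) (m : PySem.Dict String (List String)),
    (∀ x ∈ keys, x ∈ m.keys) → (pvAInner sd keys m).keys = m.keys := by
  intro keys
  induction keys with
  | nil => intro m _; simp [pvAInner]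
  | cons key rest ih =>
    intro m h
    simp only [pvAInner, List.foldl_cons]
    have hmem : key ∈ m.keys := h key (by simp)
    have hkeys : ∀ (f : List String → List String),
        (if (PySem.Dict.mk sd).contains key then m.modify key [] f else m).keys = m.keys := by
      intro f
      by_cases hc : (PySem.Dict.mk sd).contains key
      · rw [if_pos hc, PySem.Dict.keys_modify, PySem.Dict.keys_insert_of_contains]
        rw [PySem.Dict.contains_iff_mem_keys]
        exact hmem
      · rw [if_neg hc]
    have hstep := ih (if (PySem.Dict.mk sd).contains key then
        m.modify key [] (fun old => old ++ (PySem.Dict.mk sd).getD key []) else m)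
      (by intro x hx; rw [hkeys]; exact h x (by simp [hx]))
    rw [pvAInner] at hstep
    exact hstep.trans (hkeys _)

lemma pvAPage_keys (m : PySem.Dict String (List String))
    (page : List (String × List (String × List String))) (hkeys : m.keys = pvKeys) :
    (pvAPage m page).keys = pvKeys := by
  unfold pvAPage
  cases hsd : (PySem.Dict.mk page).get? "structured_data" with
  | none => exact hkeys
  | some sd =>
    show (if sd.isEmpty = true then m else pvAInner sd m.keys m).keys = pvKeys
    by_cases he : sd.isEmpty
    · rw [if_pos he]; exact hkeys
    · rw [if_neg he, pvAInner_keys sd m.keys m (fun x hx => hx)]; exact hkeys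

-- the joint page invariant for one key: B's diagonal state is Set.ofList of A's running list
lemma pvOuterK (key : String) (hkmem : key ∈ pvKeys) :
    ∀ (pages : List (List (String × List (String × List String))))
      (m : PySem.Dict String (List String)), m.keys = pvKeys →
    (pages.foldl pvAPage m).keys = pvKeys ∧
    pages.foldl (pvBPage key)
        (PySem.Set.ofList (m.getD key []), PySem.Set.ofList (m.getD key []))
      = (PySem.Set.ofList ((pages.foldl pvAPage m).getD key []),
         PySem.Set.ofList ((pages.foldl pvAPage m).getD key [])) := by
  intro pages
  induction pages with
  | nil => intro m hkeys; exact ⟨hkeys, rfl⟩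
  | cons page rest ih =>
    intro m hkeys
    simp only [List.foldl_cons]
    have hk1 : (pvAPage m page).keys = pvKeys := pvAPage_keys m page hkeys
    have h1 : pvBPage key (PySem.Set.ofList (m.getD key []), PySem.Set.ofList (m.getD key [])) page
        = (PySem.Set.ofList ((pvAPage m page).getD key []),
           PySem.Set.ofList ((pvAPage m page).getD key [])) := by
      unfold pvAPage pvBPage
      cases hsd : (PySem.Dict.mk page).get? "structured_data" with
      | none => rfl
      | some sd =>
        show (if sd.isEmpty = true then _ else ((PySem.Dict.mk sd).getD key []).foldl pvBStep _)
            = (PySem.Set.ofList ((if sd.isEmpty = true then m else pvAInner sd m.keys m).getD key []),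
               PySem.Set.ofList ((if sd.isEmpty = true then m else pvAInner sd m.keys m).getD key []))
        by_cases he : sd.isEmpty
        · rw [if_pos he, if_pos he]
        · rw [if_neg he, if_neg he, hkeys,
              pvAInner_getD sd pvKeys m (by decide) key, if_pos hkmem,
              pvBStep_diag, ← PySem.Set.ofList_append]
    rw [h1]
    exact ih (pvAPage m page) hk1

lemma pvDedup_getD :
    ∀ (keys : List String) (m : PySem.Dict String (List String)), keys.Nodup →
    ∀ k, (keys.foldl (fun m key => m.insert key (PySem.List.dedup (m.getD key []))) m).getD k []
        = if k ∈ keys then PySem.List.dedup (m.getD k []) else m.getD k [] := by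
  intro keys
  induction keys with
  | nil => intro m _ k; simp
  | cons key rest ih =>
    intro m hnd k
    rw [List.nodup_cons] at hnd
    obtain ⟨hnotmem, hndr⟩ := hnd
    simp only [List.foldl_cons]
    rw [ih _ hndr]
    by_cases hk : k = key
    · subst hk
      rw [if_neg hnotmem, PySem.Dict.getD_insert_self, if_pos (by simp)]
    · rw [PySem.Dict.getD_insert_of_ne _ _ _ hk]
      by_cases hr : k ∈ rest
      · rw [if_pos hr, if_pos (by simp [hr])]
      · rw [if_neg hr, if_neg (by simp [hk, hr])]

lemma pvMerged0_getD : ∀ k, pvMerged0.getD k [] = [] := by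
  intro k
  simp only [pvMerged0, pvKeys, List.map, PySem.Dict.ofList, PySem.Dict.update,
    List.foldl, PySem.Dict.getD_insert, PySem.Dict.getD_empty]
  split_ifs <;> rfl

lemma pvMerged0_keys : pvMerged0.keys = pvKeys := by decide

-- ===== VERDICT (by name: the statement is the Claim_ definition above) =====
theorem merge_structured_data_py_spec : Claim_equal_merge_structured_data_py := by
  intro pages _
  unfold Spec_merge_structured_data_py merge_structured_data_py merge_structured_data_py_alt
  set m1 := pages.foldl pvAPage pvMerged0 with hm1
  have hkeys : m1.keys = pvKeys := (pvOuterK "emails" (by decide) pages pvMerged0 pvMerged0_keys).1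
  have hdkeys : (pvADedup m1).keys = pvKeys := by
    unfold pvADedup
    rw [PySem.Dict.keys_foldl_insert, hkeys]
    decide
  have hdnd : (pvADedup m1).keys.Nodup := by rw [hdkeys]; decide
  rw [PySem.Dict.items_eq_map_keys _ hdnd [], hdkeys]
  apply List.map_congr_left
  intro k hkmem
  have hgetD : (pvADedup m1).getD k [] = PySem.List.dedup (m1.getD k []) := by
    unfold pvADedup
    rw [hkeys, pvDedup_getD pvKeys m1 (by decide) k, if_pos hkmem]
  have hB : pvCollectKey pages k = PySem.Set.ofList (m1.getD k []) := by
    have h0 : (PySem.Set.empty, ([] : List String))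
        = (PySem.Set.ofList (pvMerged0.getD k []), PySem.Set.ofList (pvMerged0.getD k [])) := by
      rw [pvMerged0_getD k]; rfl
    unfold pvCollectKey
    rw [h0, (pvOuterK k hkmem pages pvMerged0 pvMerged0_keys).2]
  rw [hgetD, hB, PySem.List.dedup_eq_ofList]
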